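-- pv_equiv track=rewrite | github.com/Amanda-dong/CS473-FML | src/validation/run_evaluation.py | _build_feature_groups
-- ===== SOURCE A (Python) =====
-- def _build_feature_groups(columns: list[str]) -> dict[str, list[str]]:
--     patterns: dict[str, list[str]] = {
--         "demand": ["demand", "trip", "station", "citibike"],
--         "survival": ["survival", "merchant", "viability"],
--         "rent_cost": ["rent", "pressure", "assessed", "pluto"],
--         "nlp": ["review", "healthy", "subtype", "yelp"],
--         "competition": ["competition", "restaurant_count"],
--     }
--     groups: dict[str, list[str]] = {}
--     for group, keywords in patterns.items():
--         matched = [col for col in columns if any(kw in col.lower() for kw in keywords)]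
--         if matched:
--             groups[group] = matched
--     return groups
-- ===== SOURCE B (Python) =====
-- def _build_feature_groups(columns: list[str]) -> dict[str, list[str]]:
--     entries: list[tuple[str, list[str]]] = [
--         ("demand", ["demand", "trip", "station", "citibike"]),
--         ("survival", ["survival", "merchant", "viability"]),
--         ("rent_cost", ["rent", "pressure", "assessed", "pluto"]),
--         ("nlp", ["review", "healthy", "subtype", "yelp"]),
--         ("competition", ["competition", "restaurant_count"]),
--     ]
--     # stage 1: one pass over columns -> flat list of (group_rank, group, column) matches
--     pairs: list[tuple[int, str, str]] = []
--     for col in columns: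
--         low = col.lower()
--         pairs.extend(
--             (i, g, col)
--             for i, (g, kws) in enumerate(entries)
--             if any(kw in low for kw in kws)
--         )
--     # stage 2: stable sort by group rank brings each group's columns together,
--     # preserving column order within a group
--     pairs.sort(key=lambda t: t[0])
--     # stage 3: fold the sorted pairs into the result dict
--     groups: dict[str, list[str]] = {}
--     for _, g, c in pairs:
--         groups.setdefault(g, []).append(c)
--     return groups
-- ===== Notes on version B (the rewrite author's own statement) =====
-- stated objective: alternative
-- what changed: Instead of A's five separate filter passes over columns (one per group), B makes one pass over columns emitting a flat list of (group_rank, group, column) match triples, stable-sorts it by group rank, and folds the sorted pairs into the dict with setdefault/append; the per-group scans disappear into the sort-then-group stage.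
import Mathlib
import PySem

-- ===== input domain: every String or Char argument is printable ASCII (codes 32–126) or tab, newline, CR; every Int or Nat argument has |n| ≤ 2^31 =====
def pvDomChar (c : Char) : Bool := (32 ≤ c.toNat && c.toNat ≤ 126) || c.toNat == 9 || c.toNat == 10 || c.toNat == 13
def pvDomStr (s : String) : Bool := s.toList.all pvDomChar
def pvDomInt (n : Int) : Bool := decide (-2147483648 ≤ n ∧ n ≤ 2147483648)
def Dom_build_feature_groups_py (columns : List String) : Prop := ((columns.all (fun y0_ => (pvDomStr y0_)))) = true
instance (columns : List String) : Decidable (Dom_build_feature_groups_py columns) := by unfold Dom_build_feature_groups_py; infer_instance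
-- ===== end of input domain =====

-- B replaces A's five per-group filter passes over `columns` by one pass emitting flat
-- (rank, group, column) match triples, a stable sort by rank, and a setdefault/append fold;
-- same return value, objective: alternative decomposition.

-- the literal `patterns` table both Pythons declare (dict → assoc list, insertion order)
def pvPatterns : List (String × List String) :=
  [("demand", ["demand", "trip", "station", "citibike"]),
   ("survival", ["survival", "merchant", "viability"]),
   ("rent_cost", ["rent", "pressure", "assessed", "pluto"]),
   ("nlp", ["review", "healthy", "subtype", "yelp"]),
   ("competition", ["competition", "restaurant_count"])]

-- ===== PORT A =====
-- A: for each (group, keywords), scan ALL of columns; keep the group if any column matched.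
-- `groups[group] = matched` with `patterns`' distinct keys, so the dict is built by appending.
def build_feature_groups_py (columns : List String) : List (String × List String) :=
  pvPatterns.foldl
    (fun groups p =>
      let matched := columns.filter (fun col => p.2.any (fun kw => PySem.Str.isIn kw (PySem.Str.lower col)))
      if matched ≠ [] then groups ++ [(p.1, matched)] else groups)
    []

-- ===== PORT B =====
-- B stage 3's loop body: `groups.setdefault(g, []).append(c)` on the dict
def pvStepB (d : PySem.Dict String (List String)) (t : Int × String × String) : PySem.Dict String (List String) :=
  match PySem.Dict.get? d t.2.1 with
  | some v => PySem.Dict.insert d t.2.1 (v ++ [t.2.2])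
  | none => PySem.Dict.insert d t.2.1 [t.2.2]

def build_feature_groups_py_alt (columns : List String) : List (String × List String) :=
  -- stage 1: one pass over columns -> flat (rank, group, column) match triples
  let pairs := columns.foldl
    (fun acc col =>
      let low := PySem.Str.lower col
      acc ++ ((PySem.List.enumerate pvPatterns).filter
          (fun ip => ip.2.2.any (fun kw => PySem.Str.isIn kw low))).map
          (fun ip => (ip.1, ip.2.1, col)))
    []
  -- stage 2: stable sort by group rank
  let sp := PySem.List.sorted pairs (fun t => t.1) false
  -- stage 3: fold the sorted pairs into the result dict
  (sp.foldl pvStepB (PySem.Dict.mk [])).items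

-- ===== PRECONDITION & SPEC =====
def Spec_build_feature_groups_py (columns : List String) (out : List (String × List String)) : Prop := out = build_feature_groups_py_alt columns
instance (columns : List String) (out : List (String × List String)) : Decidable (Spec_build_feature_groups_py columns out) := by unfold Spec_build_feature_groups_py; infer_instance

-- ===== CLAIM (what is proved, stated in full; the proofs are below) =====
def Claim_equal_build_feature_groups_py : Prop := ∀ (columns : List String), Dom_build_feature_groups_py columns → Spec_build_feature_groups_py columns (build_feature_groups_py columns)

-- ===== LEMMAS AND PROOFS =====

-- the match predicate both programs test
def pvMatch (kws : List String) (col : String) : Bool :=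
  kws.any (fun kw => PySem.Str.isIn kw (PySem.Str.lower col))

def pvK0 : List String := ["demand", "trip", "station", "citibike"]
def pvK1 : List String := ["survival", "merchant", "viability"]
def pvK2 : List String := ["rent", "pressure", "assessed", "pluto"]
def pvK3 : List String := ["review", "healthy", "subtype", "yelp"]
def pvK4 : List String := ["competition", "restaurant_count"]

-- the triples B's stage 1 emits for one column
def pvF (col : String) : List (Int × String × String) :=
  (if pvMatch pvK0 col then [((0:Int), "demand", col)] else []) ++
  (if pvMatch pvK1 col then [((1:Int), "survival", col)] else []) ++
  (if pvMatch pvK2 col then [((2:Int), "rent_cost", col)] else []) ++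
  (if pvMatch pvK3 col then [((3:Int), "nlp", col)] else []) ++
  (if pvMatch pvK4 col then [((4:Int), "competition", col)] else [])

lemma pvPerCol (col : String) :
    ((PySem.List.enumerate pvPatterns).filter
        (fun ip => ip.2.2.any (fun kw => PySem.Str.isIn kw (PySem.Str.lower col)))).map
        (fun ip => (ip.1, ip.2.1, col)) = pvF col := by
  have e : PySem.List.enumerate pvPatterns =
      [((0:Int), "demand", pvK0), (1, "survival", pvK1), (2, "rent_cost", pvK2),
       (3, "nlp", pvK3), (4, "competition", pvK4)] := by decide
  rw [e]
  simp only [List.filter_cons, List.filter_nil, pvF, pvMatch]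
  split_ifs <;> rfl

lemma pvPairs (columns : List String) :
    columns.foldl
      (fun acc col =>
        acc ++ ((PySem.List.enumerate pvPatterns).filter
            (fun ip => ip.2.2.any (fun kw => PySem.Str.isIn kw (PySem.Str.lower col)))).map
            (fun ip => (ip.1, ip.2.1, col)))
      [] = columns.flatMap pvF := by
  have h : (fun (acc : List (Int × String × String)) col =>
        acc ++ ((PySem.List.enumerate pvPatterns).filter
            (fun ip => ip.2.2.any (fun kw => PySem.Str.isIn kw (PySem.Str.lower col)))).map
            (fun ip => (ip.1, ip.2.1, col))) = fun acc col => acc ++ pvF col := by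
    funext acc col; rw [pvPerCol]
  rw [h, PySem.List.foldl_append_eq_flatMap, List.nil_append]

lemma pvFBounds (columns : List String) :
    ∀ p ∈ columns.flatMap pvF, 0 ≤ p.1 ∧ p.1 ≤ 4 := by
  intro p hp
  simp only [List.mem_flatMap] at hp
  obtain ⟨c, _, hp⟩ := hp
  simp only [pvF, List.mem_append] at hp
  rcases hp with ((((h|h)|h)|h)|h) <;> (split at h <;> simp_all)

lemma pvInsertMid (x : Int × String × String) :
    ∀ (A C : List (Int × String × String)),
    (∀ y ∈ A, ¬ (x.1 < y.1)) → (∀ y ∈ C, x.1 < y.1) →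
    PySem.List.insertBy (fun a b => decide (a.1 < b.1)) x (A ++ C) = A ++ x :: C := by
  intro A
  induction A with
  | nil =>
    intro C _ hC
    cases C with
    | nil => rfl
    | cons c cs => simp [PySem.List.insertBy, hC c (by simp)]
  | cons a A ih =>
    intro C hA hC
    have hfa : decide (x.1 < a.1) = false := by simp [hA a (by simp)]
    simp [PySem.List.insertBy, hfa, ih C (fun y hy => hA y (by simp [hy])) hC]

set_option maxHeartbeats 1000000 in
lemma pvSortBlocks :
    ∀ (ps : List (Int × String × String)), (∀ p ∈ ps, 0 ≤ p.1 ∧ p.1 ≤ 4) →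
    ∀ (l0 l1 l2 l3 l4 : List (Int × String × String)),
    (∀ y ∈ l0, y.1 = 0) → (∀ y ∈ l1, y.1 = 1) → (∀ y ∈ l2, y.1 = 2) →
    (∀ y ∈ l3, y.1 = 3) → (∀ y ∈ l4, y.1 = 4) →
    ps.foldl (fun acc x => PySem.List.insertBy (fun a b => decide (a.1 < b.1)) x acc)
        (l0 ++ l1 ++ l2 ++ l3 ++ l4) =
      (l0 ++ ps.filter (fun t => t.1 == 0)) ++ (l1 ++ ps.filter (fun t => t.1 == 1)) ++
      (l2 ++ ps.filter (fun t => t.1 == 2)) ++ (l3 ++ ps.filter (fun t => t.1 == 3)) ++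
      (l4 ++ ps.filter (fun t => t.1 == 4)) := by
  intro ps
  induction ps with
  | nil => intro _ l0 l1 l2 l3 l4 _ _ _ _ _; simp
  | cons p ps ih =>
    intro hb l0 l1 l2 l3 l4 h0 h1 h2 h3 h4
    have hp := hb p (by simp)
    have hps : ∀ q ∈ ps, 0 ≤ q.1 ∧ q.1 ≤ 4 := fun q hq => hb q (by simp [hq])
    rw [List.foldl_cons]
    have hk : p.1 = 0 ∨ p.1 = 1 ∨ p.1 = 2 ∨ p.1 = 3 ∨ p.1 = 4 := by omega
    rcases hk with hk | hk | hk | hk | hk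
    · have hins : PySem.List.insertBy (fun a b => decide (a.1 < b.1)) p (l0 ++ l1 ++ l2 ++ l3 ++ l4) =
          (l0 ++ [p]) ++ l1 ++ l2 ++ l3 ++ l4 := by
        have hmid := pvInsertMid p (l0) (l1 ++ l2 ++ l3 ++ l4)
          (fun y hy => by have := h0 y hy; omega)
          (fun y hy => by
          simp only [List.mem_append] at hy
          rcases hy with (((hy|hy)|hy)|hy)
          · have := h1 y hy; omega
          · have := h2 y hy; omega
          · have := h3 y hy; omega
          · have := h4 y hy; omega)
        simp only [List.append_assoc] at hmid ⊢
        try simp only [List.append_nil] at hmid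
        simp [hmid]
      rw [hins, ih hps (l0 ++ [p]) l1 l2 l3 l4
        (by
          intro y hy
          rcases List.mem_append.mp hy with hy|hy
          · exact h0 y hy
          · simp at hy; simp [hy, hk]) h1 h2 h3 h4]
      simp [hk]
    · have hins : PySem.List.insertBy (fun a b => decide (a.1 < b.1)) p (l0 ++ l1 ++ l2 ++ l3 ++ l4) =
          l0 ++ (l1 ++ [p]) ++ l2 ++ l3 ++ l4 := by
        have hmid := pvInsertMid p (l0 ++ l1) (l2 ++ l3 ++ l4)
          (fun y hy => by
          simp only [List.mem_append] at hy
          rcases hy with (hy|hy)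
          · have := h0 y hy; omega
          · have := h1 y hy; omega)
          (fun y hy => by
          simp only [List.mem_append] at hy
          rcases hy with ((hy|hy)|hy)
          · have := h2 y hy; omega
          · have := h3 y hy; omega
          · have := h4 y hy; omega)
        simp only [List.append_assoc] at hmid ⊢
        try simp only [List.append_nil] at hmid
        simp [hmid]
      rw [hins, ih hps l0 (l1 ++ [p]) l2 l3 l4
        h0 (by
          intro y hy
          rcases List.mem_append.mp hy with hy|hy
          · exact h1 y hy
          · simp at hy; simp [hy, hk]) h2 h3 h4]
      simp [hk]
    · have hins : PySem.List.insertBy (fun a b => decide (a.1 < b.1)) p (l0 ++ l1 ++ l2 ++ l3 ++ l4) =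
          l0 ++ l1 ++ (l2 ++ [p]) ++ l3 ++ l4 := by
        have hmid := pvInsertMid p (l0 ++ l1 ++ l2) (l3 ++ l4)
          (fun y hy => by
          simp only [List.mem_append] at hy
          rcases hy with ((hy|hy)|hy)
          · have := h0 y hy; omega
          · have := h1 y hy; omega
          · have := h2 y hy; omega)
          (fun y hy => by
          simp only [List.mem_append] at hy
          rcases hy with (hy|hy)
          · have := h3 y hy; omega
          · have := h4 y hy; omega)
        simp only [List.append_assoc] at hmid ⊢
        try simp only [List.append_nil] at hmid
        simp [hmid]
      rw [hins, ih hps l0 l1 (l2 ++ [p]) l3 l4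
        h0 h1 (by
          intro y hy
          rcases List.mem_append.mp hy with hy|hy
          · exact h2 y hy
          · simp at hy; simp [hy, hk]) h3 h4]
      simp [hk]
    · have hins : PySem.List.insertBy (fun a b => decide (a.1 < b.1)) p (l0 ++ l1 ++ l2 ++ l3 ++ l4) =
          l0 ++ l1 ++ l2 ++ (l3 ++ [p]) ++ l4 := by
        have hmid := pvInsertMid p (l0 ++ l1 ++ l2 ++ l3) (l4)
          (fun y hy => by
          simp only [List.mem_append] at hy
          rcases hy with (((hy|hy)|hy)|hy)
          · have := h0 y hy; omega
          · have := h1 y hy; omega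
          · have := h2 y hy; omega
          · have := h3 y hy; omega)
          (fun y hy => by have := h4 y hy; omega)
        simp only [List.append_assoc] at hmid ⊢
        try simp only [List.append_nil] at hmid
        simp [hmid]
      rw [hins, ih hps l0 l1 l2 (l3 ++ [p]) l4
        h0 h1 h2 (by
          intro y hy
          rcases List.mem_append.mp hy with hy|hy
          · exact h3 y hy
          · simp at hy; simp [hy, hk]) h4]
      simp [hk]
    · have hins : PySem.List.insertBy (fun a b => decide (a.1 < b.1)) p (l0 ++ l1 ++ l2 ++ l3 ++ l4) =
          l0 ++ l1 ++ l2 ++ l3 ++ (l4 ++ [p]) := by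
        have hmid := pvInsertMid p (l0 ++ l1 ++ l2 ++ l3 ++ l4) (([] : List (Int × String × String)))
          (fun y hy => by
          simp only [List.mem_append] at hy
          rcases hy with ((((hy|hy)|hy)|hy)|hy)
          · have := h0 y hy; omega
          · have := h1 y hy; omega
          · have := h2 y hy; omega
          · have := h3 y hy; omega
          · have := h4 y hy; omega)
          (fun y hy => absurd hy (List.not_mem_nil))
        simp only [List.append_assoc] at hmid ⊢
        try simp only [List.append_nil] at hmid
        simp [hmid]
      rw [hins, ih hps l0 l1 l2 l3 (l4 ++ [p])
        h0 h1 h2 h3 (by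
          intro y hy
          rcases List.mem_append.mp hy with hy|hy
          · exact h4 y hy
          · simp at hy; simp [hy, hk])]
      simp [hk]

-- stage-1 output filtered to rank k is the map of A's k-th filter
lemma pvFilterFlat (columns : List String) (k : Int) (g : String) (kws : List String)
    (hk : ∀ col, (pvF col).filter (fun t => t.1 == k) =
      if pvMatch kws col then [(k, g, col)] else []) :
    (columns.flatMap pvF).filter (fun t => t.1 == k) =
      (columns.filter (pvMatch kws)).map (fun c => (k, g, c)) := by
  induction columns with
  | nil => rfl
  | cons c cs ihc =>
    simp only [List.flatMap_cons, List.filter_append, ihc, hk c, List.filter_cons]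
    by_cases h : pvMatch kws c <;> simp [h]

lemma pvHk0 : ∀ col, (pvF col).filter (fun t => t.1 == (0:Int)) =
    if pvMatch pvK0 col then [((0:Int), "demand", col)] else [] := by
  intro col; unfold pvF; split_ifs <;> simp_all
lemma pvHk1 : ∀ col, (pvF col).filter (fun t => t.1 == (1:Int)) =
    if pvMatch pvK1 col then [((1:Int), "survival", col)] else [] := by
  intro col; unfold pvF; split_ifs <;> simp_all
lemma pvHk2 : ∀ col, (pvF col).filter (fun t => t.1 == (2:Int)) =
    if pvMatch pvK2 col then [((2:Int), "rent_cost", col)] else [] := by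
  intro col; unfold pvF; split_ifs <;> simp_all
lemma pvHk3 : ∀ col, (pvF col).filter (fun t => t.1 == (3:Int)) =
    if pvMatch pvK3 col then [((3:Int), "nlp", col)] else [] := by
  intro col; unfold pvF; split_ifs <;> simp_all
lemma pvHk4 : ∀ col, (pvF col).filter (fun t => t.1 == (4:Int)) =
    if pvMatch pvK4 col then [((4:Int), "competition", col)] else [] := by
  intro col; unfold pvF; split_ifs <;> simp_all

-- stage 3 over one rank block appends columns to the (g, v) entry at the end of the dict
lemma pvFoldBlockIn (g : String) (k : Int) :
    ∀ (cs : List String) (v : List String) (d : List (String × List String)),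
    (∀ q ∈ d, (q.1 == g) = false) →
    (cs.map (fun c => (k, g, c))).foldl pvStepB (PySem.Dict.mk (d ++ [(g, v)])) =
      PySem.Dict.mk (d ++ [(g, v ++ cs)]) := by
  intro cs
  induction cs with
  | nil => intro v d _; simp
  | cons c cs ih =>
    intro v d hd
    have hfind : List.find? (fun p => p.1 == g) (d ++ [(g, v)]) = some (g, v) := by
      rw [List.find?_append]
      have hnone : List.find? (fun p => p.1 == g) d = none := by
        rw [List.find?_eq_none]; intro q hq; simp [hd q hq]
      simp [hnone, List.find?]
    have hget : PySem.Dict.get? (PySem.Dict.mk (d ++ [(g, v)])) g = some v := by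
      simp [PySem.Dict.get?, hfind]
    have hcont : (PySem.Dict.mk (d ++ [(g, v)])).contains g = true := by
      simp [PySem.Dict.contains]
    have hmap : List.map (fun p => if (p.1 == g) = true then (g, v ++ [c]) else p) (d ++ [(g, v)]) =
        d ++ [(g, v ++ [c])] := by
      rw [List.map_append]
      congr 1
      · have hid : ∀ q ∈ d, (if (q.1 == g) = true then (g, v ++ [c]) else q) = q :=
          fun q hq => by simp [hd q hq]
        rw [List.map_congr_left hid]; simp
      · simp
    simp only [List.map_cons, List.foldl_cons, pvStepB, hget, PySem.Dict.insert, hcont, if_pos, hmap]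
    rw [ih (v ++ [c]) d hd]
    simp

def pvOpt (g : String) (cols : List String) : List (String × List String) :=
  if cols = [] then [] else [(g, cols)]

lemma pvFoldBlock (g : String) (k : Int) (cols : List String)
    (d : List (String × List String)) (hd : ∀ q ∈ d, (q.1 == g) = false) :
    (cols.map (fun c => (k, g, c))).foldl pvStepB (PySem.Dict.mk d) =
      PySem.Dict.mk (d ++ pvOpt g cols) := by
  cases cols with
  | nil => simp [pvOpt]
  | cons c cs =>
    have hget : PySem.Dict.get? (PySem.Dict.mk d) g = none := by
      simp only [PySem.Dict.get?, Option.map_eq_none_iff]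
      rw [List.find?_eq_none]; intro q hq; simp [hd q hq]
    have hcont : (PySem.Dict.mk d).contains g = false := by
      simp only [PySem.Dict.contains]
      rw [List.any_eq_false]; intro q hq; simp [hd q hq]
    simp only [List.map_cons, List.foldl_cons, pvStepB, hget, PySem.Dict.insert, hcont,
      Bool.false_eq_true, if_neg, not_false_eq_true]
    rw [pvFoldBlockIn g k cs [c] d hd]
    simp [pvOpt]

lemma pvMemOpt (g : String) (cols : List String) :
    ∀ q ∈ pvOpt g cols, q.1 = g := by
  intro q hq
  unfold pvOpt at hq
  split at hq
  · simp at hq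
  · simp at hq; simp [hq]

-- A's foldl over the 5 literal patterns, written with pvOpt
set_option maxHeartbeats 1000000 in
lemma pvAEval (columns : List String) :
    build_feature_groups_py columns =
      pvOpt "demand" (columns.filter (pvMatch pvK0)) ++
      pvOpt "survival" (columns.filter (pvMatch pvK1)) ++
      pvOpt "rent_cost" (columns.filter (pvMatch pvK2)) ++
      pvOpt "nlp" (columns.filter (pvMatch pvK3)) ++
      pvOpt "competition" (columns.filter (pvMatch pvK4)) := by
  unfold build_feature_groups_py
  have hstep : (fun (groups : List (String × List String)) (p : String × List String) =>
      let matched := columns.filter (fun col => p.2.any (fun kw => PySem.Str.isIn kw (PySem.Str.lower col)))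
      if matched ≠ [] then groups ++ [(p.1, matched)] else groups)
    = fun groups p => groups ++ pvOpt p.1 (columns.filter (pvMatch p.2)) := by
    funext gs p
    show (if columns.filter (pvMatch p.2) ≠ [] then gs ++ [(p.1, columns.filter (pvMatch p.2))] else gs)
        = gs ++ pvOpt p.1 (columns.filter (pvMatch p.2))
    unfold pvOpt
    by_cases h : columns.filter (pvMatch p.2) = []
    · rw [if_neg (by simp [h]), if_pos h, List.append_nil]
    · rw [if_pos h, if_neg h]
  rw [hstep, PySem.List.foldl_append_eq_flatMap]
  simp [pvPatterns, pvK0, pvK1, pvK2, pvK3, pvK4]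

-- ===== VERDICT (by name: the statement is the Claim_ definition above) =====
set_option maxHeartbeats 1000000 in
theorem build_feature_groups_py_spec : Claim_equal_build_feature_groups_py := by
  intro columns _
  show build_feature_groups_py columns = build_feature_groups_py_alt columns
  rw [pvAEval]
  show _ = (PySem.List.sorted _ _ _ |>.foldl pvStepB (PySem.Dict.mk [])).items
  rw [pvPairs, PySem.List.sorted_eq_foldl_insertBy]
  have hsort := pvSortBlocks (columns.flatMap pvF) (pvFBounds columns) [] [] [] [] []
    (by simp) (by simp) (by simp) (by simp) (by simp)
  simp only [List.nil_append] at hsort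
  rw [hsort]
  rw [pvFilterFlat columns 0 "demand" pvK0 pvHk0,
      pvFilterFlat columns 1 "survival" pvK1 pvHk1,
      pvFilterFlat columns 2 "rent_cost" pvK2 pvHk2,
      pvFilterFlat columns 3 "nlp" pvK3 pvHk3,
      pvFilterFlat columns 4 "competition" pvK4 pvHk4]
  rw [List.foldl_append, List.foldl_append, List.foldl_append, List.foldl_append]
  have hne : ∀ (g g' : String) (cols : List String), (g == g') = false →
      ∀ q ∈ pvOpt g cols, (q.1 == g') = false := by
    intro g g' cols h q hq
    rw [pvMemOpt g cols q hq]; exact h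
  have happ : ∀ {P : String × List String → Prop} {A B : List (String × List String)},
      (∀ q ∈ A, P q) → (∀ q ∈ B, P q) → ∀ q ∈ A ++ B, P q := by
    intro P A B hA hB q hq
    rcases List.mem_append.mp hq with h|h
    · exact hA q h
    · exact hB q h
  rw [pvFoldBlock "demand" 0 _ [] (by intro q hq; simp at hq)]
  simp only [List.nil_append]
  rw [pvFoldBlock "survival" 1 _ _ (hne _ _ _ (by decide))]
  rw [pvFoldBlock "rent_cost" 2 _ _ (happ (hne _ _ _ (by decide)) (hne _ _ _ (by decide)))]
  rw [pvFoldBlock "nlp" 3 _ _ (happ (happ (hne _ _ _ (by decide)) (hne _ _ _ (by decide))) (hne _ _ _ (by decide)))]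
  rw [pvFoldBlock "competition" 4 _ _ (happ (happ (happ (hne _ _ _ (by decide)) (hne _ _ _ (by decide))) (hne _ _ _ (by decide))) (hne _ _ _ (by decide)))]
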